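-- pv_equiv track=rewrite | github.com/tmmoond8/python_algorithm | 100june/level1/10409_server.py | solve
-- ===== SOURCE A (Python) =====
-- def solve(n, t, s):
--     rest = t
--     for i in range(n + 10):
--         if i == n:
--             break
--         if rest >= s[i]:
--             rest -= s[i]
--         else:
--             break
--     return i
-- ===== SOURCE B (Python) =====
-- def solve(n, t, s):
--     # Two staged passes: first materialize the full prefix-sum table of the costs,
--     # then scan its first n entries for the first cumulative cost exceeding the
--     # budget t; if no scanned prefix exceeds t, all n items are servable.
--     prefix = []
--     acc = 0
--     for x in s:
--         acc += x
--         prefix.append(acc)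
--     for i, p in enumerate(prefix[:n]):
--         if p > t:
--             return i
--     return n
-- ===== Notes on version B (the rewrite author's own statement) =====
-- stated objective: alternative
-- what changed: Replaces A's single interleaved decrement-budget-and-break loop by two staged passes: first build the full prefix-sum table of the costs, then scan its first n entries for the first cumulative sum exceeding t (returning n if none exceeds).
-- outside the precondition, e.g. on solve(-5, 100, [1, 1, 1, 1, 1]): A returns 4, B returns -5
import Mathlib
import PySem

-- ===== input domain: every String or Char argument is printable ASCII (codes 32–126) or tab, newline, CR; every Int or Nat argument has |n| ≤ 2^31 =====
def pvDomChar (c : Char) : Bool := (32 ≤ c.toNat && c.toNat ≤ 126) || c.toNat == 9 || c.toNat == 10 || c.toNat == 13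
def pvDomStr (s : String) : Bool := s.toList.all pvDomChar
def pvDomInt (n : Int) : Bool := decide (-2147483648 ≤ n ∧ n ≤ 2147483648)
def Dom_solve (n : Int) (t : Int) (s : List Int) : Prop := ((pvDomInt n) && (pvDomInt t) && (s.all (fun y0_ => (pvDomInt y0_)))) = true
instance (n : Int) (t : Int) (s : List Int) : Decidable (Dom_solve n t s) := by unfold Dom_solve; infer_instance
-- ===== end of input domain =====

-- B replaces A's interleaved decrement-budget-and-break loop by two staged passes
-- (build the full prefix-sum table of the costs, then scan its first n entries for the
-- first sum over t): an alternative decomposition of the same cost.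


-- ===== PORT A =====
-- the for-loop over the lazy range(n+10): loop variable i with the remaining range length
-- (n+10-i).toNat as fuel (0 fuel = range exhausted); state = (remaining budget, last loop variable);
-- 'none' from pyGet? is Python's IndexError and the empty-range case is Python's NameError on 'i' —
-- both outside Pre_solve, where the port returns the loop index / 0 as a placeholder.
def solveLoopA (n : Int) (s : List Int) : Nat → Int → Int → Int → Int
  | 0, _, _, last => last
  | Nat.succ k, i, rest, _ =>
    if i = n then i
    else
      match PySem.List.pyGet? s i with
      | none => i
      | some si => if rest ≥ si then solveLoopA n s k (i + 1) (rest - si) i else i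

def solve (n : Int) (t : Int) (s : List Int) : Int :=
  solveLoopA n s (n + 10).toNat 0 t 0

-- ===== PORT B =====
-- pass 1 of Source B: 'for x in s: acc += x; prefix.append(acc)' — the prefix-sum table of s
def buildB : List Int → Int → List Int
  | [], _ => []
  | x :: xs, acc => (acc + x) :: buildB xs (acc + x)

-- pass 2 of Source B: enumerate(prefix[:n]), return the first index whose entry exceeds t, else n
def scanB (t : Int) (n : Int) : List Int → Int → Int
  | [], _ => n
  | p :: ps, i => if p > t then i else scanB t n ps (i + 1)

def solve_alt (n : Int) (t : Int) (s : List Int) : Int :=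
  scanB t n (PySem.List.slice (buildB s 0) none (some n)) 0

-- ===== PRECONDITION & SPEC =====
-- Pre_ admits nonnegative counts on which A's scan terminates: either n items exist, or some
-- prefix of the costs already exceeds the budget so A's scan stops early. Excluded: inputs where
-- A raises (IndexError when the scan runs off the end with n > len(s); NameError for n ≤ -10),
-- and negative counts -10 < n < 0, outside the natural domain, where A's return value is
-- leftover loop state (see cites).
def Pre_solve (n : Int) (t : Int) (s : List Int) : Prop :=
  0 ≤ n ∧ (n ≤ (s.length : Int) ∨ ∃ k, k < s.length ∧ (s.take (k + 1)).sum > t)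
instance (n : Int) (t : Int) (s : List Int) : Decidable (Pre_solve n t s) := by unfold Pre_solve; infer_instance
def pvWitness_solve : Int × Int × List Int := (2, 5, [3, 3])
def Spec_solve (n : Int) (t : Int) (s : List Int) (out : Int) : Prop := out = solve_alt n t s
instance (n : Int) (t : Int) (s : List Int) (out : Int) : Decidable (Spec_solve n t s out) := by unfold Spec_solve; infer_instance

-- ===== CLAIM (what is proved, stated in full; the proofs are below) =====
def Claim_equal_solve : Prop := ∀ (n : Int) (t : Int) (s : List Int), Dom_solve n t s → Pre_solve n t s → Spec_solve n t s (solve n t s)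

-- ===== LEMMAS AND PROOFS =====

-- reference function: first index whose cumulative cost exceeds the budget, else the length
def fSpec (t : Int) : List Int → Nat
  | [] => 0
  | x :: xs => if x ≤ t then fSpec (t - x) xs + 1 else 0

theorem exists_prefix_lt (t : Int) : ∀ xs : List Int,
    (∃ k, k < xs.length ∧ (xs.take (k + 1)).sum > t) → fSpec t xs < xs.length := by
  intro xs
  induction xs generalizing t with
  | nil => rintro ⟨k, hk, _⟩; simp at hk
  | cons x xs ih =>
    rintro ⟨k, hk, hsum⟩
    simp only [fSpec, List.length_cons]
    by_cases hx : x ≤ t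
    · rw [if_pos hx]
      have : fSpec (t - x) xs < xs.length := by
        apply ih
        cases k with
        | zero => simp at hsum; omega
        | succ k' =>
          refine ⟨k', by simpa using hk, ?_⟩
          simp only [List.take, List.sum_cons] at hsum
          omega
      omega
    · rw [if_neg hx]
      omega

theorem solveLoopA_eq (n : Int) (s : List Int) (m : Nat) (hn : n = (m : Int)) :
    ∀ (a : Nat) (rest last : Int), a ≤ m →
      (m ≤ s.length ∨ fSpec rest ((s.take m).drop a) < ((s.take m).drop a).length) →
      solveLoopA n s (m + 10 - a) (a : Int) rest last
        = (a : Int) + (fSpec rest ((s.take m).drop a) : Int) := by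
  intro a
  induction h : m - a generalizing a with
  | zero =>
    intro rest last ha _
    have haem : a = m := by omega
    subst haem
    rw [show a + 10 - a = Nat.succ 9 by omega]
    have hnil : (s.take a).length ≤ a := by rw [List.length_take]; exact Nat.min_le_left _ _
    simp [solveLoopA, hn, List.drop_eq_nil_of_le hnil, fSpec]
  | succ k ih =>
    intro rest last ha hsafe
    have ham : a < m := by omega
    rw [show m + 10 - a = Nat.succ (m + 10 - (a + 1)) by omega]
    have hne : (a : Int) ≠ n := by omega
    have hlt : a < s.length := by
      rcases hsafe with hml | hfs
      · omega
      · rw [List.length_drop, List.length_take] at hfs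
        omega
    have hget : PySem.List.pyGet? s ((a : Nat) : Int) = s[a]? := PySem.List.pyGet?_natCast s a
    have hdrop : (s.take m).drop a = s[a] :: (s.take m).drop (a + 1) := by
      rw [List.drop_eq_getElem_cons (by simp; omega)]
      simp [List.getElem_take]
    rw [hdrop]
    rw [hdrop] at hsafe
    simp only [solveLoopA, hne, if_false, hget, List.getElem?_eq_getElem hlt]
    by_cases hc : rest ≥ s[a]
    · have hsafe' : m ≤ s.length ∨
          fSpec (rest - s[a]) ((s.take m).drop (a + 1)) < ((s.take m).drop (a + 1)).length := by
        rcases hsafe with hml | hfs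
        · left; exact hml
        · right
          rw [fSpec, if_pos (by omega), List.length_cons] at hfs
          omega
      have := ih (a + 1) (by omega) (rest - s[a]) (a : Int) (by omega) hsafe'
      push_cast at this ⊢
      rw [if_pos hc, this, fSpec, if_pos hc]
      push_cast
      ring
    · rw [if_neg hc, fSpec, if_neg (by omega)]
      simp

-- pass 1 commutes with take: the first k prefix sums of s are the prefix sums of s's first k costs
theorem buildB_take (k : Nat) : ∀ (xs : List Int) (c : Int),
    (buildB xs c).take k = buildB (xs.take k) c := by
  induction k with
  | zero => intro xs c; cases xs <;> simp [buildB]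
  | succ k ih =>
    intro xs c
    cases xs with
    | nil => simp [buildB]
    | cons x xs => simp [buildB, List.take_succ_cons, ih]


-- pass 2 over pass 1's table computes fSpec (or n when the whole table stays within budget)
theorem scanB_buildB (t n : Int) : ∀ (ys : List Int) (c : Int) (i : Int),
    scanB t n (buildB ys c) i
      = if fSpec (t - c) ys = ys.length then n else i + (fSpec (t - c) ys : Int) := by
  intro ys
  induction ys with
  | nil => intro c i; simp [buildB, scanB, fSpec]
  | cons x ys ih =>
    intro c i
    simp only [buildB, scanB]
    by_cases hc : c + x > t
    · rw [if_pos hc]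
      have h0 : fSpec (t - c) (x :: ys) = 0 := by
        rw [fSpec, if_neg (by omega)]
      rw [h0, List.length_cons]
      rw [if_neg (by omega)]
      simp
    · rw [if_neg hc, ih (c + x) (i + 1)]
      have h1 : fSpec (t - c) (x :: ys) = fSpec (t - (c + x)) ys + 1 := by
        rw [fSpec, if_pos (by omega), show t - c - x = t - (c + x) by ring]
      rw [h1, List.length_cons]
      by_cases he : fSpec (t - (c + x)) ys = ys.length
      · rw [if_pos he, if_pos (by omega)]
      · rw [if_neg he, if_neg (by omega)]
        push_cast
        ring

-- ===== VERDICT (by name: the statement is the Claim_ definition above) =====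
theorem solve_spec : Claim_equal_solve := by
  intro n t s _ hpre
  obtain ⟨hn0, hrest⟩ := hpre
  set m : Nat := n.toNat with hmdef
  have hn : n = (m : Int) := by omega
  have hsafe : m ≤ s.length ∨ fSpec t ((s.take m).drop 0) < ((s.take m).drop 0).length := by
    rcases hrest with hml | ⟨k, hk, hsum⟩
    · left; omega
    · by_cases hml : m ≤ s.length
      · left; exact hml
      · right
        have hts : s.take m = s := List.take_of_length_le (by omega)
        rw [List.drop_zero, hts]
        exact exists_prefix_lt t s ⟨k, hk, hsum⟩
  unfold Spec_solve solve solve_alt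
  have hA := solveLoopA_eq n s m hn 0 t 0 (by omega) hsafe
  rw [show m + 10 - 0 = (n + 10).toNat by omega] at hA
  have hslice : PySem.List.slice (buildB s 0) none (some n) = (buildB s 0).take m := by
    rw [hn]; exact PySem.List.slice_to_natCast _ m
  rw [hslice, buildB_take, scanB_buildB]
  norm_num at hA ⊢
  rw [hA]
  by_cases he : fSpec t (s.take m) = min m s.length
  · rw [if_pos he, he]
    rcases hsafe with hml | hfs
    · rw [hn]
      omega
    · rw [List.drop_zero, List.length_take] at hfs
      omega
  · rw [if_neg he]
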